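-- pv_equiv track=rewrite | github.com/chminipark/algorithm | Programmers/kakao/2018 KAKAO BLIND RECRUITMENT/3차 방금그곡.py | cal_scale
-- ===== SOURCE A (Python) =====
-- def cal_scale(scale, minute):
--     result = ''
--     sharp_cnt = scale.count('#')
--     multi = minute // (len(scale) - sharp_cnt)
--     rest = minute % (len(scale) - sharp_cnt)
--     result = multi * scale
--
--     idx = 0
--     rest_cnt = 0
--     while rest_cnt < rest:
--         result += scale[idx]
--         if idx != len(scale)-1 and scale[idx+1] == '#':
--             result += scale[idx+1]
--             idx += 1
--         idx += 1
--         rest_cnt += 1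
--
--     return result
-- ===== SOURCE B (Python) =====
-- def cal_scale(scale, minute):
--     # One pass marks which character positions start a note: a '#' starts a note
--     # only when the previous character did not start one (otherwise the '#' is
--     # absorbed as that note's sharp).  The answer is then whole repetitions of
--     # the scale plus a single slice of it up to the rest-th note-start position;
--     # no note strings are ever built or concatenated.
--     positions = []
--     prev = False
--     for i, c in enumerate(scale):
--         prev = not (c == '#' and prev)
--         if prev:
--             positions.append(i)
--     multi, rest = divmod(minute, len(scale) - scale.count('#'))
--     return multi * scale + scale[:positions[rest]]
-- ===== Notes on version B (the rewrite author's own statement) =====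
-- stated objective: alternative
-- what changed: B never emits notes: it computes note-start positions with a boolean absorption recurrence over the characters, then returns multi*scale plus one slice of the scale at the rest-th start position, replacing A's emit-as-you-walk string-concatenation loop (which is quadratic in rest; B avoids that, though the probe confirmed it only on some input families).
import Mathlib
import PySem

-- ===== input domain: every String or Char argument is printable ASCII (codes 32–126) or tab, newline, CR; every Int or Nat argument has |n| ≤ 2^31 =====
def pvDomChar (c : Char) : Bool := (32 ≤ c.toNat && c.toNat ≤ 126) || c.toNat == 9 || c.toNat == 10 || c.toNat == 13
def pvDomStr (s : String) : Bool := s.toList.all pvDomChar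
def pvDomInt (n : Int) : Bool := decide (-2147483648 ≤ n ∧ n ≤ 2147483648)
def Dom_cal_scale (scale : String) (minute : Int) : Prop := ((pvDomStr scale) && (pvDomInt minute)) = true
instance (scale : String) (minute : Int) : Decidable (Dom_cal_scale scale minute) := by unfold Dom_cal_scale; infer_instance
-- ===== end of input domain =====

-- B computes note-start positions with a boolean recurrence and takes one slice of the
-- scale; A builds the remainder by an emit-as-you-walk index/counter loop. Return values
-- are proved equal on Pre_ (scale has some non-'#' character).

-- ===== PORT A =====
-- the while loop: state (idx, rest_cnt); runs rest - rest_cnt more times, here as fuel n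
def calALoop (s : List Char) : Nat → Nat → List Char
  | _, 0 => []
  | idx, n+1 =>
    let c := PySem.List.pyGetD s (idx : Int) ' '          -- scale[idx]; in range under Pre_
    if (idx : Int) ≠ PySem.Chars.len s - 1 ∧ PySem.List.pyGetD s ((idx : Int) + 1) ' ' = '#' then
      c :: PySem.List.pyGetD s ((idx : Int) + 1) ' ' :: calALoop s (idx + 2) n
    else
      c :: calALoop s (idx + 1) n

def cal_scale (scale : String) (minute : Int) : String :=
  let s := scale.toList
  let sharp_cnt := PySem.Str.count scale "#"
  let multi := PySem.Int.floordiv minute (PySem.Str.len scale - sharp_cnt)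
  let rest := PySem.Int.mod minute (PySem.Str.len scale - sharp_cnt)
  String.ofList (PySem.List.pyRepeat s multi ++ calALoop s 0 rest.toNat)

-- ===== PORT B =====
-- the for-loop over enumerate(scale): state (positions, prev); positions built in order
def bLoop : List Char → Nat → Bool → List Nat
  | [], _, _ => []
  | c :: t, i, prev =>
    let cur := !(c == '#' && prev)
    if cur then i :: bLoop t (i + 1) cur else bLoop t (i + 1) cur

def cal_scale_alt (scale : String) (minute : Int) : String :=
  let s := scale.toList
  let positions := bLoop s 0 false
  match PySem.Int.divmod? minute (PySem.Str.len scale - PySem.Str.count scale "#") with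
  | none => ""                                            -- ZeroDivisionError; outside Pre_
  | some (multi, rest) =>
    match PySem.List.pyGet? positions rest with
    | none => ""                                          -- IndexError; unreachable under Pre_
    | some p =>
      String.ofList (PySem.List.pyRepeat s multi ++ PySem.List.slice s none (some (p : Int)))

-- ===== PRECONDITION & SPEC =====
-- Pre_ excludes exactly the inputs where both Pythons raise ZeroDivisionError:
-- scales consisting only of '#' (including the empty scale).
def Pre_cal_scale (scale : String) (minute : Int) : Prop :=
  scale.toList.any (fun c => c ≠ '#') = true

instance (scale : String) (minute : Int) : Decidable (Pre_cal_scale scale minute) := by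
  unfold Pre_cal_scale; infer_instance

def pvWitness_cal_scale : String × Int := ("CC#BCC#BC", 5)

def Spec_cal_scale (scale : String) (minute : Int) (out : String) : Prop := out = cal_scale_alt scale minute
instance (scale : String) (minute : Int) (out : String) : Decidable (Spec_cal_scale scale minute out) := by unfold Spec_cal_scale; infer_instance

-- ===== CLAIM (what is proved, stated in full; the proofs are below) =====
def Claim_equal_cal_scale : Prop := ∀ (scale : String) (minute : Int), Dom_cal_scale scale minute → Pre_cal_scale scale minute → Spec_cal_scale scale minute (cal_scale scale minute)

-- ===== LEMMAS AND PROOFS =====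

-- proof-side view of A's walk: the notes, each a char plus absorbed trailing '#'
def parseTokens : List Char → List (List Char)
  | [] => []
  | c :: '#' :: rest => [c, '#'] :: parseTokens rest
  | c :: rest => [c] :: parseTokens rest

-- start offsets of the tokens, beginning at i
def tokenStartsFrom (i : Nat) : List (List Char) → List Nat
  | [] => []
  | tok :: toks => i :: tokenStartsFrom (i + tok.length) toks

-- scale.count('#') is the number of '#' characters
theorem countGo_singleton (c : Char) (l : List Char) (fuel acc : Nat) (h : l.length ≤ fuel) :
    PySem.Chars.count.go [c] fuel l acc = acc + l.count c := by
  induction l generalizing fuel acc with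
  | nil => cases fuel <;> simp [PySem.Chars.count.go]
  | cons x t ih =>
    cases fuel with
    | zero => simp at h
    | succ m =>
      simp only [List.length_cons] at h
      have hm : t.length ≤ m := by omega
      by_cases hx : x = c
      · have hstep : PySem.Chars.count.go [c] (m + 1) (x :: t) acc =
            PySem.Chars.count.go [c] m t (acc + 1) := by
          simp [PySem.Chars.count.go, List.isPrefixOf, hx]
        rw [hstep, ih m (acc + 1) hm, List.count_cons]
        simp [hx]; omega
      · have hstep : PySem.Chars.count.go [c] (m + 1) (x :: t) acc =
            PySem.Chars.count.go [c] m t acc := by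
          simp [PySem.Chars.count.go, List.isPrefixOf]
          exact fun h => absurd h.symm hx
        rw [hstep, ih m acc hm, List.count_cons]
        simp [hx]

theorem count_singleton (cs : List Char) (c : Char) :
    PySem.Chars.count cs [c] = cs.count c := by
  simp [PySem.Chars.count, countGo_singleton c cs cs.length 0 le_rfl]

def nonSharp (l : List Char) : Nat := l.countP (fun c => c != '#')

theorem nonSharp_add_count (l : List Char) : nonSharp l + l.count '#' = l.length := by
  induction l with
  | nil => rfl
  | cons x t ih =>
    by_cases hx : x = '#' <;> simp [nonSharp, List.count_cons, hx] at * <;> omega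

theorem nonSharp_cons (c : Char) (l : List Char) :
    nonSharp (c :: l) = (if c = '#' then 0 else 1) + nonSharp l := by
  by_cases hc : c = '#' <;> simp [nonSharp, hc]; omega

theorem parseTokens_cons_ne (c y : Char) (t : List Char) (hy : y ≠ '#') :
    parseTokens (c :: y :: t) = [c] :: parseTokens (y :: t) := by
  rw [parseTokens.eq_def]
  split <;> simp_all

theorem nonSharp_pos_ne_nil {l : List Char} (h : 0 < nonSharp l) : l ≠ [] := by
  intro he; subst he; simp [nonSharp] at h

-- tokens partition the string
theorem parseTokens_cons_not_sharp (c : Char) (rest : List Char)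
    (h : ∀ t, rest ≠ '#' :: t) :
    parseTokens (c :: rest) = [c] :: parseTokens rest := by
  cases rest with
  | nil => rfl
  | cons y t =>
    have hy : y ≠ '#' := fun he => h t (by rw [he])
    exact parseTokens_cons_ne c y t hy

theorem parseTokens_flatten (l : List Char) : (parseTokens l).flatten = l := by
  induction l using parseTokens.induct with
  | case1 => rfl
  | case2 c rest ih => simp [parseTokens, ih]
  | case3 c rest h ih =>
    rw [parseTokens_cons_not_sharp c rest h]
    simp [ih]

-- at least one token per non-'#' character
theorem nonSharp_le_tokens (l : List Char) : nonSharp l ≤ (parseTokens l).length := by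
  induction l using parseTokens.induct with
  | case1 => simp [nonSharp, parseTokens]
  | case2 c rest ih =>
    rw [parseTokens, nonSharp_cons, nonSharp_cons, if_pos rfl]
    simp only [List.length_cons]
    split <;> omega
  | case3 c rest h ih =>
    rw [parseTokens_cons_not_sharp c rest h, nonSharp_cons]
    simp only [List.length_cons]
    split <;> omega

theorem tokenStartsFrom_get (toks : List (List Char)) (i n : Nat) (h : n < toks.length) :
    (tokenStartsFrom i toks)[n]? = some (i + ((toks.take n).flatten).length) := by
  induction toks generalizing i n with
  | nil => simp at h
  | cons t ts ih =>
    cases n with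
    | zero => simp [tokenStartsFrom]
    | succ m =>
      simp only [List.length_cons] at h
      rw [tokenStartsFrom]
      simp only [List.getElem?_cons_succ]
      rw [ih (i + t.length) m (by omega)]
      simp [List.take_succ_cons]
      omega

-- B's loop lists the token start positions (prev=true forces a non-'#' head: a '#' there
-- would have been absorbed into the previous token)
theorem bLoop_eq_tokenStarts (l : List Char) (i : Nat) (prev : Bool)
    (hp : prev = true → ∀ t, l ≠ '#' :: t) :
    bLoop l i prev = tokenStartsFrom i (parseTokens l) := by
  induction l using parseTokens.induct generalizing i prev with
  | case1 => rfl
  | case2 c rest ih =>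
    have hcur : (!(c == '#' && prev)) = true := by
      by_cases hc : c = '#'
      · subst hc
        cases prev with
        | false => simp
        | true => exact absurd rfl (hp rfl _)
      · simp [hc]
    rw [bLoop, parseTokens]
    simp only [hcur, if_true]
    -- after the start char, the following '#' is absorbed: prev becomes false
    have hstep : bLoop ('#' :: rest) (i + 1) true = bLoop rest (i + 1 + 1) false := by
      rw [bLoop]; simp
    rw [hstep, ih (i + 1 + 1) false (by intro h; cases h)]
    simp [tokenStartsFrom]
  | case3 c rest h ih =>
    have hcur : (!(c == '#' && prev)) = true := by
      by_cases hc : c = '#'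
      · subst hc
        cases prev with
        | false => simp
        | true => exact absurd rfl (hp rfl _)
      · simp [hc]
    rw [bLoop, parseTokens_cons_not_sharp c rest h]
    simp only [hcur, if_true]
    rw [ih (i + 1) true (fun _ t he => h t he)]
    simp [tokenStartsFrom]

-- A's walk, started at index idx with n steps to go, spells out the first n tokens of the suffix
theorem calALoop_eq_tokens (s : List Char) (n idx : Nat)
    (h : n ≤ nonSharp (s.drop idx)) :
    calALoop s idx n = ((parseTokens (s.drop idx)).take n).flatten := by
  induction n generalizing idx with
  | zero => simp [calALoop]
  | succ m ih =>
    have hpos : 0 < nonSharp (s.drop idx) := by omega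
    have hne : s.drop idx ≠ [] := nonSharp_pos_ne_nil hpos
    have hidx : idx < s.length := by
      by_contra hge
      exact hne (List.drop_eq_nil_of_le (by omega))
    have hdrop : s.drop idx = s[idx] :: s.drop (idx + 1) := by
      rw [List.drop_eq_getElem_cons hidx]
    have hget : PySem.List.pyGetD s (idx : Int) ' ' = s[idx] := by
      simpa using PySem.List.pyGetD_ofNat (h := hidx) (d := ' ')
    by_cases hnext : idx + 1 < s.length ∧ s[idx + 1]? = some '#'
    · -- sharp case: token [s[idx], '#']
      obtain ⟨h1, h2⟩ := hnext
      have h2' : s[idx + 1]'h1 = '#' := by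
        rw [List.getElem?_eq_getElem h1] at h2
        injection h2
      have hpg : PySem.List.pyGetD s ((idx : Int) + 1) ' ' = s[idx + 1]'h1 := by
        have := PySem.List.pyGetD_ofNat (h := h1) (d := ' ') (xs := s)
        rw [← this]; norm_cast
      have hget2 : PySem.List.pyGetD s ((idx : Int) + 1) ' ' = '#' := by
        rw [hpg, h2']
      have hcond : (idx : Int) ≠ PySem.Chars.len s - 1 := by
        simp [PySem.Chars.len]; omega
      have hdrop2 : s.drop (idx + 1) = '#' :: s.drop (idx + 2) := by
        rw [List.drop_eq_getElem_cons h1, h2']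
      have hcount : m ≤ nonSharp (s.drop (idx + 2)) := by
        have h' : m + 1 ≤ nonSharp (s[idx] :: '#' :: s.drop (idx + 2)) := by
          rw [← hdrop2, ← hdrop]; exact h
        rw [nonSharp_cons, nonSharp_cons] at h'
        split at h' <;> simp at h' <;> omega
      rw [calALoop]
      simp only [hget, hget2, hcond, ne_eq, not_false_iff, true_and]
      rw [ih _ hcount, hdrop, hdrop2, parseTokens]
      simp
    · -- no following '#': token [s[idx]]
      have hcond : ¬ ((idx : Int) ≠ PySem.Chars.len s - 1 ∧ PySem.List.pyGetD s ((idx : Int) + 1) ' ' = '#') := by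
        intro ⟨hc1, hc2⟩
        apply hnext
        have h1 : idx + 1 < s.length := by
          simp [PySem.Chars.len] at hc1; omega
        have hpg : PySem.List.pyGetD s ((idx : Int) + 1) ' ' = s[idx + 1]'h1 := by
          have := PySem.List.pyGetD_ofNat (h := h1) (d := ' ') (xs := s)
          rw [← this]; norm_cast
        refine ⟨h1, ?_⟩
        rw [List.getElem?_eq_getElem h1, ← hpg, hc2]
      have hdropshape : parseTokens (s.drop idx) = [s[idx]] :: parseTokens (s.drop (idx + 1)) := by
        rw [hdrop]
        cases hd : s.drop (idx + 1) with
        | nil => rfl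
        | cons y t =>
          have hy : y ≠ '#' := by
            intro he
            have h1 : idx + 1 < s.length := by
              by_contra hge
              rw [List.drop_eq_nil_of_le (by omega)] at hd
              simp at hd
            have h2 : s.drop (idx + 1) = s[idx + 1] :: s.drop (idx + 2) :=
              List.drop_eq_getElem_cons h1
            rw [hd] at h2
            injection h2 with ha _
            exact hnext ⟨h1, by rw [List.getElem?_eq_getElem h1, ← ha, he]⟩
          exact parseTokens_cons_ne _ _ _ hy
      have hcount : m ≤ nonSharp (s.drop (idx + 1)) := by
        have h' : m + 1 ≤ nonSharp (s[idx] :: s.drop (idx + 1)) := by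
          rw [← hdrop]; exact h
        rw [nonSharp_cons] at h'
        split at h' <;> omega
      rw [calALoop]
      simp only [hget, if_neg hcond]
      rw [ih _ hcount, hdropshape]
      simp

-- ===== VERDICT (by name: the statement is the Claim_ definition above) =====
theorem cal_scale_spec : Claim_equal_cal_scale := by
  intro scale minute _ pre
  unfold Spec_cal_scale cal_scale cal_scale_alt
  set s := scale.toList with hs
  have hcnt : PySem.Str.count scale "#" = s.count '#' := by
    rw [PySem.Str.count_eq]
    exact count_singleton s '#'
  have hx : ∃ c ∈ s, c ≠ '#' := by
    unfold Pre_cal_scale at pre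
    simpa using pre
  have hlt : s.count '#' < s.length := by
    have h1 := nonSharp_add_count s
    have h2 : 0 < nonSharp s := by
      obtain ⟨c, hc, hne⟩ := hx
      exact List.countP_pos_iff.mpr ⟨c, hc, by simpa using hne⟩
    omega
  have hlen : PySem.Str.len scale = (s.length : Int) := by
    simp [PySem.Str.len, hs]
  have hd : PySem.Str.len scale - (PySem.Str.count scale "#" : Int) = ((nonSharp s : Nat) : Int) := by
    rw [hlen, hcnt]
    have := nonSharp_add_count s
    omega
  have hdpos : (0 : Int) < PySem.Str.len scale - (PySem.Str.count scale "#" : Int) := by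
    rw [hd]
    have h1 := nonSharp_add_count s
    have h2 : 0 < nonSharp s := by
      obtain ⟨c, hc, hne⟩ := hx
      exact List.countP_pos_iff.mpr ⟨c, hc, by simpa using hne⟩
    exact_mod_cast h2
  have hdm : PySem.Int.divmod? minute (PySem.Str.len scale - (PySem.Str.count scale "#" : Int)) =
      some (PySem.Int.floordiv minute (PySem.Str.len scale - (PySem.Str.count scale "#" : Int)),
            PySem.Int.mod minute (PySem.Str.len scale - (PySem.Str.count scale "#" : Int))) := by
    rw [PySem.Int.divmod?, if_neg (by omega)]
    rfl
  simp only [hdm]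
  set rest := PySem.Int.mod minute (PySem.Str.len scale - (PySem.Str.count scale "#" : Int)) with hrest
  have hrest_nonneg : 0 ≤ rest := PySem.Int.mod_nonneg minute hdpos
  have hrest_lt : rest < ((nonSharp s : Nat) : Int) := by
    rw [← hd]; exact PySem.Int.mod_lt minute hdpos
  have hrn : rest.toNat < nonSharp s := by omega
  set toks := parseTokens s with htoks
  have hpos : bLoop s 0 false = tokenStartsFrom 0 toks :=
    bLoop_eq_tokenStarts s 0 false (by intro h; exact absurd h (by simp))
  have hklt : rest.toNat < toks.length := lt_of_lt_of_le hrn (nonSharp_le_tokens s)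
  have hget : PySem.List.pyGet? (bLoop s 0 false) rest =
      some ((toks.take rest.toNat).flatten.length) := by
    rw [PySem.List.pyGet?_of_nonneg (bLoop s 0 false) hrest_nonneg, hpos,
        tokenStartsFrom_get toks 0 rest.toNat (by omega)]
    simp
  simp only [hget]
  have hslice : PySem.List.slice s none (some (((toks.take rest.toNat).flatten.length : Nat) : Int)) =
      s.take (toks.take rest.toNat).flatten.length := PySem.List.slice_to_natCast s _
  rw [hslice]
  have hflat : s = (toks.take rest.toNat).flatten ++ (toks.drop rest.toNat).flatten := by
    rw [← List.flatten_append, List.take_append_drop, htoks, parseTokens_flatten]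
  have htake : s.take (toks.take rest.toNat).flatten.length = (toks.take rest.toNat).flatten := by
    conv_lhs => rw [hflat]
    exact List.take_left
  rw [htake, calALoop_eq_tokens s rest.toNat 0 (by simpa using le_of_lt hrn)]
  simp only [List.drop_zero]
  rw [htoks]
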